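-- pv_equiv track=rewrite | github.com/mikewarot/Bitgrid_python | bitgrid/cli/list_dependencies.py | lut_uses_inputs
-- ===== SOURCE A (Python) =====
-- from typing import List, Tuple, Optional
--
-- def lut_uses_inputs(lut_bits: int) -> List[bool]:
--     uses = [False, False, False, False]
--     for var in range(4):
--         delta = 1 << var
--         for idx in range(16):
--             b0 = (lut_bits >> idx) & 1
--             b1 = (lut_bits >> (idx ^ delta)) & 1
--             if b0 != b1:
--                 uses[var] = True
--                 break
--     return uses
-- ===== SOURCE B (Python) =====
-- def lut_uses_inputs(lut_bits):
--     masks = [0x5555, 0x3333, 0x0F0F, 0x00FF]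
--     return [(lut_bits ^ (lut_bits >> (1 << var))) & masks[var] != 0 for var in range(4)]
-- ===== Notes on version B (the rewrite author's own statement) =====
-- stated objective: alternative
-- what changed: Replaces A's per-variable inner scan over every LUT index (with early break) by a single word-wide test per variable: XOR the LUT bits with their self shifted by the variable's stride, mask to the aligned bit pairs, and check whether anything remains.
import Mathlib
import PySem

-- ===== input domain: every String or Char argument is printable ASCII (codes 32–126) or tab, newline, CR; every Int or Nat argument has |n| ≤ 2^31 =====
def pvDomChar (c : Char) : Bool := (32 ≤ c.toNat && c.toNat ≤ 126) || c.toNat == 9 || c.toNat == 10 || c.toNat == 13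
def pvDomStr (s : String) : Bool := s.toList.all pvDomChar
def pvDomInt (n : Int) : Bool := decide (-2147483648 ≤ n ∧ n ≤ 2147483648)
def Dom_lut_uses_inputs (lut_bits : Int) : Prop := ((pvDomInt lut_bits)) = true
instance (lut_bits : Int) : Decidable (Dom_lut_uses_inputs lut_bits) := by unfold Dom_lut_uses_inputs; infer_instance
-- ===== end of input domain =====

-- B replaces A's per-variable 16-iteration inner scan by a single word-wide XOR-and-mask test per variable (alternative bit-parallel formulation); equivalence of return values proved for every Int.

-- ===== PORT A =====
-- the inner 'for idx in range(16): … break' loop: true as soon as a pair of bits differs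
def lutInnerScan (lut_bits : Int) (delta : Int) : List Int → Bool
  | [] => false
  | idx :: rest =>
      let b0 := PySem.Int.band (lut_bits >>> idx.toNat) 1
      let b1 := PySem.Int.band (lut_bits >>> (PySem.Int.bxor idx delta).toNat) 1
      if b0 ≠ b1 then true else lutInnerScan lut_bits delta rest

def lut_uses_inputs (lut_bits : Int) : List Bool :=
  (PySem.List.pyRange 0 4 1).foldl
    (fun uses var =>
      let delta : Int := 1 <<< var.toNat
      if lutInnerScan lut_bits delta (PySem.List.pyRange 0 16 1) then uses.set var.toNat true else uses)
    [false, false, false, false]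

-- ===== PORT B =====
def lutMasks : List Int := [0x5555, 0x3333, 0x0F0F, 0x00FF]

def lut_uses_inputs_alt (lut_bits : Int) : List Bool :=
  (PySem.List.pyRange 0 4 1).map (fun var =>
    decide (PySem.Int.band (PySem.Int.bxor lut_bits (lut_bits >>> ((1:Int) <<< var.toNat).toNat))
      (PySem.List.pyGetD lutMasks var 0) ≠ 0))

-- ===== PRECONDITION & SPEC =====
def Spec_lut_uses_inputs (lut_bits : Int) (out : List Bool) : Prop := out = lut_uses_inputs_alt lut_bits
instance (lut_bits : Int) (out : List Bool) : Decidable (Spec_lut_uses_inputs lut_bits out) := by unfold Spec_lut_uses_inputs; infer_instance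

-- ===== CLAIM (what is proved, stated in full; the proofs are below) =====
def Claim_equal_lut_uses_inputs : Prop := ∀ (lut_bits : Int), Dom_lut_uses_inputs lut_bits → Spec_lut_uses_inputs lut_bits (lut_uses_inputs lut_bits)

-- ===== LEMMAS AND PROOFS =====

theorem pyR16 : PySem.List.pyRange 0 16 1 = [0,1,2,3,4,5,6,7,8,9,10,11,12,13,14,15] := by decide

theorem pyR4 : PySem.List.pyRange 0 4 1 = [0,1,2,3] := by decide

-- comparing Python's '(x >> j) & 1' values is comparing bits, nonnegative case
theorem decide_band_eq_ofNat (n j k : Nat) :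
    decide (PySem.Int.band (((n:Int)) >>> j) 1 = PySem.Int.band (((n:Int)) >>> k) 1)
      = (n.testBit j == n.testBit k) := by
  show decide (PySem.Int.band ((n >>> j : Nat) : Int) 1 = PySem.Int.band ((n >>> k : Nat) : Int) 1) = _
  have hb : ∀ m : Nat, PySem.Int.band ((m:Int)) 1 = ((m &&& 1 : Nat) : Int) := by
    intro m; exact_mod_cast PySem.Int.band_natCast m 1
  have ht : ∀ i : Nat, n >>> i &&& 1 = (n.testBit i).toNat := by
    intro i; simp [Nat.and_one_is_mod, Nat.toNat_testBit, Nat.shiftRight_eq_div_pow]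
  rw [hb, hb, ht, ht]
  rcases n.testBit j <;> rcases n.testBit k <;> simp

-- negative case: both bits are complemented, so the comparison is again a bit comparison
theorem band_negSucc_one (m : Nat) : PySem.Int.band (Int.negSucc m) 1 = 1 - ((m &&& 1 : Nat) : Int) := by
  rw [PySem.Int.band_one, PySem.Int.mod_eq_emod_of_pos (b := 2) (by norm_num), Int.negSucc_eq]
  have : ((m &&& 1 : Nat) : Int) = (m : Int) % 2 := by
    rw [Nat.and_one_is_mod]; push_cast; omega
  omega

theorem decide_band_eq_negSucc (n j k : Nat) :
    decide (PySem.Int.band ((Int.negSucc n) >>> j) 1 = PySem.Int.band ((Int.negSucc n) >>> k) 1)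
      = (n.testBit j == n.testBit k) := by
  show decide (PySem.Int.band (Int.negSucc (n >>> j)) 1 = PySem.Int.band (Int.negSucc (n >>> k)) 1) = _
  have ht : ∀ i : Nat, n >>> i &&& 1 = (n.testBit i).toNat := by
    intro i; simp [Nat.and_one_is_mod, Nat.toNat_testBit, Nat.shiftRight_eq_div_pow]
  rw [band_negSucc_one, band_negSucc_one, ht, ht]
  rcases n.testBit j <;> rcases n.testBit k <;> simp


theorem decide_band_ne_ofNat (n j k : Nat) :
    decide (PySem.Int.band (((n:Int)) >>> j) 1 ≠ PySem.Int.band (((n:Int)) >>> k) 1)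
      = (n.testBit j != n.testBit k) := by
  simp only [ne_eq, decide_not, decide_band_eq_ofNat]
  rfl

theorem decide_band_ne_negSucc (n j k : Nat) :
    decide (PySem.Int.band ((Int.negSucc n) >>> j) 1 ≠ PySem.Int.band ((Int.negSucc n) >>> k) 1)
      = (n.testBit j != n.testBit k) := by
  simp only [ne_eq, decide_not, decide_band_eq_negSucc]
  rfl

theorem bxor_negSucc (a b : Nat) : PySem.Int.bxor (Int.negSucc a) (Int.negSucc b) = ((a ^^^ b : Nat) : Int) := by
  have h1 : ¬ (0 ≤ Int.negSucc a) := by simp [Int.negSucc_eq]; omega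
  have h2 : ¬ (0 ≤ Int.negSucc b) := by simp [Int.negSucc_eq]; omega
  rw [PySem.Int.bxor, if_neg h1, if_neg h2]
  have ha : (-Int.negSucc a - 1).toNat = a := by rw [Int.negSucc_eq]; omega
  have hb : (-Int.negSucc b - 1).toNat = b := by rw [Int.negSucc_eq]; omega
  rw [ha, hb]

-- B's masked word: the same natural number whether x is ≥ 0 or < 0
theorem band_bxor_ofNat (n D m : Nat) :
    PySem.Int.band (PySem.Int.bxor ((n:Int)) (((n:Int)) >>> D)) ((m:Int))
      = (((n ^^^ (n >>> D)) &&& m : Nat) : Int) := by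
  show PySem.Int.band (PySem.Int.bxor ((n:Int)) ((n >>> D : Nat) : Int)) ((m:Int)) = _
  rw [PySem.Int.bxor_natCast n (n >>> D)]
  exact PySem.Int.band_natCast (n ^^^ (n >>> D)) m

theorem band_bxor_negSucc (n D m : Nat) :
    PySem.Int.band (PySem.Int.bxor (Int.negSucc n) ((Int.negSucc n) >>> D)) ((m:Int))
      = (((n ^^^ (n >>> D)) &&& m : Nat) : Int) := by
  show PySem.Int.band (PySem.Int.bxor (Int.negSucc n) (Int.negSucc (n >>> D))) ((m:Int)) = _
  rw [bxor_negSucc n (n >>> D)]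
  exact PySem.Int.band_natCast (n ^^^ (n >>> D)) m

-- a masked word is nonzero iff some masked bit pair differs
theorem mask_ne_zero_iff (n D m : Nat) (pos : List Nat) (hm : ∀ i, m.testBit i = decide (i ∈ pos)) :
    (¬ (((n ^^^ (n >>> D)) &&& m) = 0)) ↔ ∃ i ∈ pos, n.testBit i ≠ n.testBit (D + i) := by
  constructor
  · intro h
    obtain ⟨i, hi⟩ := Nat.exists_testBit_of_ne_zero h
    rw [Nat.testBit_and, Nat.testBit_xor, Nat.testBit_shiftRight, hm] at hi
    refine ⟨i, ?_, ?_⟩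
    · revert hi; rcases h2 : decide (i ∈ pos) <;> simp_all
    · revert hi; rcases n.testBit i <;> rcases n.testBit (D + i) <;> simp
  · rintro ⟨i, hip, hne⟩
    intro h0
    have hz : ((n ^^^ n >>> D) &&& m).testBit i = false := by rw [h0]; simp
    rw [Nat.testBit_and, Nat.testBit_xor, Nat.testBit_shiftRight, hm] at hz
    revert hz; rcases h1 : n.testBit i <;> rcases h2 : n.testBit (D + i) <;> simp_all


theorem maskbit_0 : ∀ i, (21845 : Nat).testBit i = decide (i ∈ [0,2,4,6,8,10,12,14]) := by
  intro i
  by_cases h : i < 16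
  · interval_cases i <;> decide
  · rw [Nat.testBit_lt_two_pow (lt_of_lt_of_le (show (21845:Nat) < 2^16 by norm_num)
      (Nat.pow_le_pow_right (by norm_num) (by omega)))]
    symm; rw [decide_eq_false_iff_not]
    simp only [List.mem_cons, List.not_mem_nil, or_false]
    omega


theorem maskbit_1 : ∀ i, (13107 : Nat).testBit i = decide (i ∈ [0,1,4,5,8,9,12,13]) := by
  intro i
  by_cases h : i < 16
  · interval_cases i <;> decide
  · rw [Nat.testBit_lt_two_pow (lt_of_lt_of_le (show (13107:Nat) < 2^16 by norm_num)
      (Nat.pow_le_pow_right (by norm_num) (by omega)))]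
    symm; rw [decide_eq_false_iff_not]
    simp only [List.mem_cons, List.not_mem_nil, or_false]
    omega


theorem maskbit_2 : ∀ i, (3855 : Nat).testBit i = decide (i ∈ [0,1,2,3,8,9,10,11]) := by
  intro i
  by_cases h : i < 16
  · interval_cases i <;> decide
  · rw [Nat.testBit_lt_two_pow (lt_of_lt_of_le (show (3855:Nat) < 2^16 by norm_num)
      (Nat.pow_le_pow_right (by norm_num) (by omega)))]
    symm; rw [decide_eq_false_iff_not]
    simp only [List.mem_cons, List.not_mem_nil, or_false]
    omega


theorem maskbit_3 : ∀ i, (255 : Nat).testBit i = decide (i ∈ [0,1,2,3,4,5,6,7]) := by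
  intro i
  by_cases h : i < 16
  · interval_cases i <;> decide
  · rw [Nat.testBit_lt_two_pow (lt_of_lt_of_le (show (255:Nat) < 2^16 by norm_num)
      (Nat.pow_le_pow_right (by norm_num) (by omega)))]
    symm; rw [decide_eq_false_iff_not]
    simp only [List.mem_cons, List.not_mem_nil, or_false]
    omega


theorem key_0 (x : Int) :
    lutInnerScan x 1 (PySem.List.pyRange 0 16 1)
      = decide (PySem.Int.band (PySem.Int.bxor x (x >>> (1:Nat))) 21845 ≠ 0) := by
  rw [pyR16]
  rcases x with n | n
  · simp only [Int.ofNat_eq_natCast]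
    simp only [show ((21845:Int)) = ((21845:Nat):Int) from rfl]
    simp only [band_bxor_ofNat n 1 21845]
    simp only [lutInnerScan, Bool.if_true_left, show Int.toNat 0 = 0 from rfl, show Int.toNat 1 = 1 from rfl, show Int.toNat 2 = 2 from rfl, show Int.toNat 3 = 3 from rfl, show Int.toNat 4 = 4 from rfl, show Int.toNat 5 = 5 from rfl, show Int.toNat 6 = 6 from rfl, show Int.toNat 7 = 7 from rfl, show Int.toNat 8 = 8 from rfl, show Int.toNat 9 = 9 from rfl, show Int.toNat 10 = 10 from rfl, show Int.toNat 11 = 11 from rfl, show Int.toNat 12 = 12 from rfl, show Int.toNat 13 = 13 from rfl, show Int.toNat 14 = 14 from rfl, show Int.toNat 15 = 15 from rfl]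
    simp only [show PySem.Int.bxor 0 1 = 1 from by decide, show PySem.Int.bxor 1 1 = 0 from by decide, show PySem.Int.bxor 2 1 = 3 from by decide, show PySem.Int.bxor 3 1 = 2 from by decide, show PySem.Int.bxor 4 1 = 5 from by decide, show PySem.Int.bxor 5 1 = 4 from by decide, show PySem.Int.bxor 6 1 = 7 from by decide, show PySem.Int.bxor 7 1 = 6 from by decide, show PySem.Int.bxor 8 1 = 9 from by decide, show PySem.Int.bxor 9 1 = 8 from by decide, show PySem.Int.bxor 10 1 = 11 from by decide, show PySem.Int.bxor 11 1 = 10 from by decide, show PySem.Int.bxor 12 1 = 13 from by decide, show PySem.Int.bxor 13 1 = 12 from by decide, show PySem.Int.bxor 14 1 = 15 from by decide, show PySem.Int.bxor 15 1 = 14 from by decide, show Int.toNat 0 = 0 from rfl, show Int.toNat 1 = 1 from rfl, show Int.toNat 2 = 2 from rfl, show Int.toNat 3 = 3 from rfl, show Int.toNat 4 = 4 from rfl, show Int.toNat 5 = 5 from rfl, show Int.toNat 6 = 6 from rfl, show Int.toNat 7 = 7 from rfl, show Int.toNat 8 = 8 from rfl, show Int.toNat 9 = 9 from rfl, show Int.toNat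 10 = 10 from rfl, show Int.toNat 11 = 11 from rfl, show Int.toNat 12 = 12 from rfl, show Int.toNat 13 = 13 from rfl, show Int.toNat 14 = 14 from rfl, show Int.toNat 15 = 15 from rfl]
    simp only [decide_band_ne_ofNat]
    rw [Bool.eq_iff_iff]
    simp only [Bool.or_eq_true, bne_iff_ne, ne_eq, decide_eq_true_eq, Int.natCast_eq_zero]
    rw [mask_ne_zero_iff n 1 21845 [0,2,4,6,8,10,12,14] maskbit_0]
    simp only [List.mem_cons, List.not_mem_nil, or_false, exists_eq_or_imp, exists_eq_left]
    norm_num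
    constructor
    · intro h; tauto
    · intro h; tauto
  · simp only [show ((21845:Int)) = ((21845:Nat):Int) from rfl]
    simp only [band_bxor_negSucc n 1 21845]
    simp only [lutInnerScan, Bool.if_true_left, show Int.toNat 0 = 0 from rfl, show Int.toNat 1 = 1 from rfl, show Int.toNat 2 = 2 from rfl, show Int.toNat 3 = 3 from rfl, show Int.toNat 4 = 4 from rfl, show Int.toNat 5 = 5 from rfl, show Int.toNat 6 = 6 from rfl, show Int.toNat 7 = 7 from rfl, show Int.toNat 8 = 8 from rfl, show Int.toNat 9 = 9 from rfl, show Int.toNat 10 = 10 from rfl, show Int.toNat 11 = 11 from rfl, show Int.toNat 12 = 12 from rfl, show Int.toNat 13 = 13 from rfl, show Int.toNat 14 = 14 from rfl, show Int.toNat 15 = 15 from rfl]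
    simp only [show PySem.Int.bxor 0 1 = 1 from by decide, show PySem.Int.bxor 1 1 = 0 from by decide, show PySem.Int.bxor 2 1 = 3 from by decide, show PySem.Int.bxor 3 1 = 2 from by decide, show PySem.Int.bxor 4 1 = 5 from by decide, show PySem.Int.bxor 5 1 = 4 from by decide, show PySem.Int.bxor 6 1 = 7 from by decide, show PySem.Int.bxor 7 1 = 6 from by decide, show PySem.Int.bxor 8 1 = 9 from by decide, show PySem.Int.bxor 9 1 = 8 from by decide, show PySem.Int.bxor 10 1 = 11 from by decide, show PySem.Int.bxor 11 1 = 10 from by decide, show PySem.Int.bxor 12 1 = 13 from by decide, show PySem.Int.bxor 13 1 = 12 from by decide, show PySem.Int.bxor 14 1 = 15 from by decide, show PySem.Int.bxor 15 1 = 14 from by decide, show Int.toNat 0 = 0 from rfl, show Int.toNat 1 = 1 from rfl, show Int.toNat 2 = 2 from rfl, show Int.toNat 3 = 3 from rfl, show Int.toNat 4 = 4 from rfl, show Int.toNat 5 = 5 from rfl, show Int.toNat 6 = 6 from rfl, show Int.toNat 7 = 7 from rfl, show Int.toNat 8 = 8 from rfl, show Int.toNat 9 = 9 from rfl, show Int.toNat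 10 = 10 from rfl, show Int.toNat 11 = 11 from rfl, show Int.toNat 12 = 12 from rfl, show Int.toNat 13 = 13 from rfl, show Int.toNat 14 = 14 from rfl, show Int.toNat 15 = 15 from rfl]
    simp only [decide_band_ne_negSucc]
    rw [Bool.eq_iff_iff]
    simp only [Bool.or_eq_true, bne_iff_ne, ne_eq, decide_eq_true_eq, Int.natCast_eq_zero]
    rw [mask_ne_zero_iff n 1 21845 [0,2,4,6,8,10,12,14] maskbit_0]
    simp only [List.mem_cons, List.not_mem_nil, or_false, exists_eq_or_imp, exists_eq_left]
    norm_num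
    constructor
    · intro h; tauto
    · intro h; tauto


theorem key_1 (x : Int) :
    lutInnerScan x 2 (PySem.List.pyRange 0 16 1)
      = decide (PySem.Int.band (PySem.Int.bxor x (x >>> (2:Nat))) 13107 ≠ 0) := by
  rw [pyR16]
  rcases x with n | n
  · simp only [Int.ofNat_eq_natCast]
    simp only [show ((13107:Int)) = ((13107:Nat):Int) from rfl]
    simp only [band_bxor_ofNat n 2 13107]
    simp only [lutInnerScan, Bool.if_true_left, show Int.toNat 0 = 0 from rfl, show Int.toNat 1 = 1 from rfl, show Int.toNat 2 = 2 from rfl, show Int.toNat 3 = 3 from rfl, show Int.toNat 4 = 4 from rfl, show Int.toNat 5 = 5 from rfl, show Int.toNat 6 = 6 from rfl, show Int.toNat 7 = 7 from rfl, show Int.toNat 8 = 8 from rfl, show Int.toNat 9 = 9 from rfl, show Int.toNat 10 = 10 from rfl, show Int.toNat 11 = 11 from rfl, show Int.toNat 12 = 12 from rfl, show Int.toNat 13 = 13 from rfl, show Int.toNat 14 = 14 from rfl, show Int.toNat 15 = 15 from rfl]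
    simp only [show PySem.Int.bxor 0 2 = 2 from by decide, show PySem.Int.bxor 1 2 = 3 from by decide, show PySem.Int.bxor 2 2 = 0 from by decide, show PySem.Int.bxor 3 2 = 1 from by decide, show PySem.Int.bxor 4 2 = 6 from by decide, show PySem.Int.bxor 5 2 = 7 from by decide, show PySem.Int.bxor 6 2 = 4 from by decide, show PySem.Int.bxor 7 2 = 5 from by decide, show PySem.Int.bxor 8 2 = 10 from by decide, show PySem.Int.bxor 9 2 = 11 from by decide, show PySem.Int.bxor 10 2 = 8 from by decide, show PySem.Int.bxor 11 2 = 9 from by decide, show PySem.Int.bxor 12 2 = 14 from by decide, show PySem.Int.bxor 13 2 = 15 from by decide, show PySem.Int.bxor 14 2 = 12 from by decide, show PySem.Int.bxor 15 2 = 13 from by decide, show Int.toNat 0 = 0 from rfl, show Int.toNat 1 = 1 from rfl, show Int.toNat 2 = 2 from rfl, show Int.toNat 3 = 3 from rfl, show Int.toNat 4 = 4 from rfl, show Int.toNat 5 = 5 from rfl, show Int.toNat 6 = 6 from rfl, show Int.toNat 7 = 7 from rfl, show Int.toNat 8 = 8 from rfl, show Int.toNat 9 = 9 from rfl, show Int.toNat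 10 = 10 from rfl, show Int.toNat 11 = 11 from rfl, show Int.toNat 12 = 12 from rfl, show Int.toNat 13 = 13 from rfl, show Int.toNat 14 = 14 from rfl, show Int.toNat 15 = 15 from rfl]
    simp only [decide_band_ne_ofNat]
    rw [Bool.eq_iff_iff]
    simp only [Bool.or_eq_true, bne_iff_ne, ne_eq, decide_eq_true_eq, Int.natCast_eq_zero]
    rw [mask_ne_zero_iff n 2 13107 [0,1,4,5,8,9,12,13] maskbit_1]
    simp only [List.mem_cons, List.not_mem_nil, or_false, exists_eq_or_imp, exists_eq_left]
    norm_num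
    constructor
    · intro h; tauto
    · intro h; tauto
  · simp only [show ((13107:Int)) = ((13107:Nat):Int) from rfl]
    simp only [band_bxor_negSucc n 2 13107]
    simp only [lutInnerScan, Bool.if_true_left, show Int.toNat 0 = 0 from rfl, show Int.toNat 1 = 1 from rfl, show Int.toNat 2 = 2 from rfl, show Int.toNat 3 = 3 from rfl, show Int.toNat 4 = 4 from rfl, show Int.toNat 5 = 5 from rfl, show Int.toNat 6 = 6 from rfl, show Int.toNat 7 = 7 from rfl, show Int.toNat 8 = 8 from rfl, show Int.toNat 9 = 9 from rfl, show Int.toNat 10 = 10 from rfl, show Int.toNat 11 = 11 from rfl, show Int.toNat 12 = 12 from rfl, show Int.toNat 13 = 13 from rfl, show Int.toNat 14 = 14 from rfl, show Int.toNat 15 = 15 from rfl]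
    simp only [show PySem.Int.bxor 0 2 = 2 from by decide, show PySem.Int.bxor 1 2 = 3 from by decide, show PySem.Int.bxor 2 2 = 0 from by decide, show PySem.Int.bxor 3 2 = 1 from by decide, show PySem.Int.bxor 4 2 = 6 from by decide, show PySem.Int.bxor 5 2 = 7 from by decide, show PySem.Int.bxor 6 2 = 4 from by decide, show PySem.Int.bxor 7 2 = 5 from by decide, show PySem.Int.bxor 8 2 = 10 from by decide, show PySem.Int.bxor 9 2 = 11 from by decide, show PySem.Int.bxor 10 2 = 8 from by decide, show PySem.Int.bxor 11 2 = 9 from by decide, show PySem.Int.bxor 12 2 = 14 from by decide, show PySem.Int.bxor 13 2 = 15 from by decide, show PySem.Int.bxor 14 2 = 12 from by decide, show PySem.Int.bxor 15 2 = 13 from by decide, show Int.toNat 0 = 0 from rfl, show Int.toNat 1 = 1 from rfl, show Int.toNat 2 = 2 from rfl, show Int.toNat 3 = 3 from rfl, show Int.toNat 4 = 4 from rfl, show Int.toNat 5 = 5 from rfl, show Int.toNat 6 = 6 from rfl, show Int.toNat 7 = 7 from rfl, show Int.toNat 8 = 8 from rfl, show Int.toNat 9 = 9 from rfl, show Int.toNat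 10 = 10 from rfl, show Int.toNat 11 = 11 from rfl, show Int.toNat 12 = 12 from rfl, show Int.toNat 13 = 13 from rfl, show Int.toNat 14 = 14 from rfl, show Int.toNat 15 = 15 from rfl]
    simp only [decide_band_ne_negSucc]
    rw [Bool.eq_iff_iff]
    simp only [Bool.or_eq_true, bne_iff_ne, ne_eq, decide_eq_true_eq, Int.natCast_eq_zero]
    rw [mask_ne_zero_iff n 2 13107 [0,1,4,5,8,9,12,13] maskbit_1]
    simp only [List.mem_cons, List.not_mem_nil, or_false, exists_eq_or_imp, exists_eq_left]
    norm_num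
    constructor
    · intro h; tauto
    · intro h; tauto


theorem key_2 (x : Int) :
    lutInnerScan x 4 (PySem.List.pyRange 0 16 1)
      = decide (PySem.Int.band (PySem.Int.bxor x (x >>> (4:Nat))) 3855 ≠ 0) := by
  rw [pyR16]
  rcases x with n | n
  · simp only [Int.ofNat_eq_natCast]
    simp only [show ((3855:Int)) = ((3855:Nat):Int) from rfl]
    simp only [band_bxor_ofNat n 4 3855]
    simp only [lutInnerScan, Bool.if_true_left, show Int.toNat 0 = 0 from rfl, show Int.toNat 1 = 1 from rfl, show Int.toNat 2 = 2 from rfl, show Int.toNat 3 = 3 from rfl, show Int.toNat 4 = 4 from rfl, show Int.toNat 5 = 5 from rfl, show Int.toNat 6 = 6 from rfl, show Int.toNat 7 = 7 from rfl, show Int.toNat 8 = 8 from rfl, show Int.toNat 9 = 9 from rfl, show Int.toNat 10 = 10 from rfl, show Int.toNat 11 = 11 from rfl, show Int.toNat 12 = 12 from rfl, show Int.toNat 13 = 13 from rfl, show Int.toNat 14 = 14 from rfl, show Int.toNat 15 = 15 from rfl]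
    simp only [show PySem.Int.bxor 0 4 = 4 from by decide, show PySem.Int.bxor 1 4 = 5 from by decide, show PySem.Int.bxor 2 4 = 6 from by decide, show PySem.Int.bxor 3 4 = 7 from by decide, show PySem.Int.bxor 4 4 = 0 from by decide, show PySem.Int.bxor 5 4 = 1 from by decide, show PySem.Int.bxor 6 4 = 2 from by decide, show PySem.Int.bxor 7 4 = 3 from by decide, show PySem.Int.bxor 8 4 = 12 from by decide, show PySem.Int.bxor 9 4 = 13 from by decide, show PySem.Int.bxor 10 4 = 14 from by decide, show PySem.Int.bxor 11 4 = 15 from by decide, show PySem.Int.bxor 12 4 = 8 from by decide, show PySem.Int.bxor 13 4 = 9 from by decide, show PySem.Int.bxor 14 4 = 10 from by decide, show PySem.Int.bxor 15 4 = 11 from by decide, show Int.toNat 0 = 0 from rfl, show Int.toNat 1 = 1 from rfl, show Int.toNat 2 = 2 from rfl, show Int.toNat 3 = 3 from rfl, show Int.toNat 4 = 4 from rfl, show Int.toNat 5 = 5 from rfl, show Int.toNat 6 = 6 from rfl, show Int.toNat 7 = 7 from rfl, show Int.toNat 8 = 8 from rfl, show Int.toNat 9 = 9 from rfl, show Int.toNat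 10 = 10 from rfl, show Int.toNat 11 = 11 from rfl, show Int.toNat 12 = 12 from rfl, show Int.toNat 13 = 13 from rfl, show Int.toNat 14 = 14 from rfl, show Int.toNat 15 = 15 from rfl]
    simp only [decide_band_ne_ofNat]
    rw [Bool.eq_iff_iff]
    simp only [Bool.or_eq_true, bne_iff_ne, ne_eq, decide_eq_true_eq, Int.natCast_eq_zero]
    rw [mask_ne_zero_iff n 4 3855 [0,1,2,3,8,9,10,11] maskbit_2]
    simp only [List.mem_cons, List.not_mem_nil, or_false, exists_eq_or_imp, exists_eq_left]
    norm_num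
    constructor
    · intro h; tauto
    · intro h; tauto
  · simp only [show ((3855:Int)) = ((3855:Nat):Int) from rfl]
    simp only [band_bxor_negSucc n 4 3855]
    simp only [lutInnerScan, Bool.if_true_left, show Int.toNat 0 = 0 from rfl, show Int.toNat 1 = 1 from rfl, show Int.toNat 2 = 2 from rfl, show Int.toNat 3 = 3 from rfl, show Int.toNat 4 = 4 from rfl, show Int.toNat 5 = 5 from rfl, show Int.toNat 6 = 6 from rfl, show Int.toNat 7 = 7 from rfl, show Int.toNat 8 = 8 from rfl, show Int.toNat 9 = 9 from rfl, show Int.toNat 10 = 10 from rfl, show Int.toNat 11 = 11 from rfl, show Int.toNat 12 = 12 from rfl, show Int.toNat 13 = 13 from rfl, show Int.toNat 14 = 14 from rfl, show Int.toNat 15 = 15 from rfl]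
    simp only [show PySem.Int.bxor 0 4 = 4 from by decide, show PySem.Int.bxor 1 4 = 5 from by decide, show PySem.Int.bxor 2 4 = 6 from by decide, show PySem.Int.bxor 3 4 = 7 from by decide, show PySem.Int.bxor 4 4 = 0 from by decide, show PySem.Int.bxor 5 4 = 1 from by decide, show PySem.Int.bxor 6 4 = 2 from by decide, show PySem.Int.bxor 7 4 = 3 from by decide, show PySem.Int.bxor 8 4 = 12 from by decide, show PySem.Int.bxor 9 4 = 13 from by decide, show PySem.Int.bxor 10 4 = 14 from by decide, show PySem.Int.bxor 11 4 = 15 from by decide, show PySem.Int.bxor 12 4 = 8 from by decide, show PySem.Int.bxor 13 4 = 9 from by decide, show PySem.Int.bxor 14 4 = 10 from by decide, show PySem.Int.bxor 15 4 = 11 from by decide, show Int.toNat 0 = 0 from rfl, show Int.toNat 1 = 1 from rfl, show Int.toNat 2 = 2 from rfl, show Int.toNat 3 = 3 from rfl, show Int.toNat 4 = 4 from rfl, show Int.toNat 5 = 5 from rfl, show Int.toNat 6 = 6 from rfl, show Int.toNat 7 = 7 from rfl, show Int.toNat 8 = 8 from rfl, show Int.toNat 9 = 9 from rfl, show Int.toNat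 10 = 10 from rfl, show Int.toNat 11 = 11 from rfl, show Int.toNat 12 = 12 from rfl, show Int.toNat 13 = 13 from rfl, show Int.toNat 14 = 14 from rfl, show Int.toNat 15 = 15 from rfl]
    simp only [decide_band_ne_negSucc]
    rw [Bool.eq_iff_iff]
    simp only [Bool.or_eq_true, bne_iff_ne, ne_eq, decide_eq_true_eq, Int.natCast_eq_zero]
    rw [mask_ne_zero_iff n 4 3855 [0,1,2,3,8,9,10,11] maskbit_2]
    simp only [List.mem_cons, List.not_mem_nil, or_false, exists_eq_or_imp, exists_eq_left]
    norm_num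
    constructor
    · intro h; tauto
    · intro h; tauto


theorem key_3 (x : Int) :
    lutInnerScan x 8 (PySem.List.pyRange 0 16 1)
      = decide (PySem.Int.band (PySem.Int.bxor x (x >>> (8:Nat))) 255 ≠ 0) := by
  rw [pyR16]
  rcases x with n | n
  · simp only [Int.ofNat_eq_natCast]
    simp only [show ((255:Int)) = ((255:Nat):Int) from rfl]
    simp only [band_bxor_ofNat n 8 255]
    simp only [lutInnerScan, Bool.if_true_left, show Int.toNat 0 = 0 from rfl, show Int.toNat 1 = 1 from rfl, show Int.toNat 2 = 2 from rfl, show Int.toNat 3 = 3 from rfl, show Int.toNat 4 = 4 from rfl, show Int.toNat 5 = 5 from rfl, show Int.toNat 6 = 6 from rfl, show Int.toNat 7 = 7 from rfl, show Int.toNat 8 = 8 from rfl, show Int.toNat 9 = 9 from rfl, show Int.toNat 10 = 10 from rfl, show Int.toNat 11 = 11 from rfl, show Int.toNat 12 = 12 from rfl, show Int.toNat 13 = 13 from rfl, show Int.toNat 14 = 14 from rfl, show Int.toNat 15 = 15 from rfl]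
    simp only [show PySem.Int.bxor 0 8 = 8 from by decide, show PySem.Int.bxor 1 8 = 9 from by decide, show PySem.Int.bxor 2 8 = 10 from by decide, show PySem.Int.bxor 3 8 = 11 from by decide, show PySem.Int.bxor 4 8 = 12 from by decide, show PySem.Int.bxor 5 8 = 13 from by decide, show PySem.Int.bxor 6 8 = 14 from by decide, show PySem.Int.bxor 7 8 = 15 from by decide, show PySem.Int.bxor 8 8 = 0 from by decide, show PySem.Int.bxor 9 8 = 1 from by decide, show PySem.Int.bxor 10 8 = 2 from by decide, show PySem.Int.bxor 11 8 = 3 from by decide, show PySem.Int.bxor 12 8 = 4 from by decide, show PySem.Int.bxor 13 8 = 5 from by decide, show PySem.Int.bxor 14 8 = 6 from by decide, show PySem.Int.bxor 15 8 = 7 from by decide, show Int.toNat 0 = 0 from rfl, show Int.toNat 1 = 1 from rfl, show Int.toNat 2 = 2 from rfl, show Int.toNat 3 = 3 from rfl, show Int.toNat 4 = 4 from rfl, show Int.toNat 5 = 5 from rfl, show Int.toNat 6 = 6 from rfl, show Int.toNat 7 = 7 from rfl, show Int.toNat 8 = 8 from rfl, show Int.toNat 9 = 9 from rfl, show Int.toNat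 10 = 10 from rfl, show Int.toNat 11 = 11 from rfl, show Int.toNat 12 = 12 from rfl, show Int.toNat 13 = 13 from rfl, show Int.toNat 14 = 14 from rfl, show Int.toNat 15 = 15 from rfl]
    simp only [decide_band_ne_ofNat]
    rw [Bool.eq_iff_iff]
    simp only [Bool.or_eq_true, bne_iff_ne, ne_eq, decide_eq_true_eq, Int.natCast_eq_zero]
    rw [mask_ne_zero_iff n 8 255 [0,1,2,3,4,5,6,7] maskbit_3]
    simp only [List.mem_cons, List.not_mem_nil, or_false, exists_eq_or_imp, exists_eq_left]
    norm_num
    constructor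
    · intro h; tauto
    · intro h; tauto
  · simp only [show ((255:Int)) = ((255:Nat):Int) from rfl]
    simp only [band_bxor_negSucc n 8 255]
    simp only [lutInnerScan, Bool.if_true_left, show Int.toNat 0 = 0 from rfl, show Int.toNat 1 = 1 from rfl, show Int.toNat 2 = 2 from rfl, show Int.toNat 3 = 3 from rfl, show Int.toNat 4 = 4 from rfl, show Int.toNat 5 = 5 from rfl, show Int.toNat 6 = 6 from rfl, show Int.toNat 7 = 7 from rfl, show Int.toNat 8 = 8 from rfl, show Int.toNat 9 = 9 from rfl, show Int.toNat 10 = 10 from rfl, show Int.toNat 11 = 11 from rfl, show Int.toNat 12 = 12 from rfl, show Int.toNat 13 = 13 from rfl, show Int.toNat 14 = 14 from rfl, show Int.toNat 15 = 15 from rfl]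
    simp only [show PySem.Int.bxor 0 8 = 8 from by decide, show PySem.Int.bxor 1 8 = 9 from by decide, show PySem.Int.bxor 2 8 = 10 from by decide, show PySem.Int.bxor 3 8 = 11 from by decide, show PySem.Int.bxor 4 8 = 12 from by decide, show PySem.Int.bxor 5 8 = 13 from by decide, show PySem.Int.bxor 6 8 = 14 from by decide, show PySem.Int.bxor 7 8 = 15 from by decide, show PySem.Int.bxor 8 8 = 0 from by decide, show PySem.Int.bxor 9 8 = 1 from by decide, show PySem.Int.bxor 10 8 = 2 from by decide, show PySem.Int.bxor 11 8 = 3 from by decide, show PySem.Int.bxor 12 8 = 4 from by decide, show PySem.Int.bxor 13 8 = 5 from by decide, show PySem.Int.bxor 14 8 = 6 from by decide, show PySem.Int.bxor 15 8 = 7 from by decide, show Int.toNat 0 = 0 from rfl, show Int.toNat 1 = 1 from rfl, show Int.toNat 2 = 2 from rfl, show Int.toNat 3 = 3 from rfl, show Int.toNat 4 = 4 from rfl, show Int.toNat 5 = 5 from rfl, show Int.toNat 6 = 6 from rfl, show Int.toNat 7 = 7 from rfl, show Int.toNat 8 = 8 from rfl, show Int.toNat 9 = 9 from rfl, show Int.toNat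 10 = 10 from rfl, show Int.toNat 11 = 11 from rfl, show Int.toNat 12 = 12 from rfl, show Int.toNat 13 = 13 from rfl, show Int.toNat 14 = 14 from rfl, show Int.toNat 15 = 15 from rfl]
    simp only [decide_band_ne_negSucc]
    rw [Bool.eq_iff_iff]
    simp only [Bool.or_eq_true, bne_iff_ne, ne_eq, decide_eq_true_eq, Int.natCast_eq_zero]
    rw [mask_ne_zero_iff n 8 255 [0,1,2,3,4,5,6,7] maskbit_3]
    simp only [List.mem_cons, List.not_mem_nil, or_false, exists_eq_or_imp, exists_eq_left]
    norm_num
    constructor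
    · intro h; tauto
    · intro h; tauto


theorem A_list (x : Int) :
    lut_uses_inputs x = [lutInnerScan x 1 (PySem.List.pyRange 0 16 1),
      lutInnerScan x 2 (PySem.List.pyRange 0 16 1),
      lutInnerScan x 4 (PySem.List.pyRange 0 16 1),
      lutInnerScan x 8 (PySem.List.pyRange 0 16 1)] := by
  unfold lut_uses_inputs
  rw [pyR4]
  simp only [List.foldl]
  by_cases h1 : lutInnerScan x 1 (PySem.List.pyRange 0 16 1) <;>
    by_cases h2 : lutInnerScan x 2 (PySem.List.pyRange 0 16 1) <;>
      by_cases h4 : lutInnerScan x 4 (PySem.List.pyRange 0 16 1) <;>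
        by_cases h8 : lutInnerScan x 8 (PySem.List.pyRange 0 16 1) <;>
          simp [h1, h2, h4, h8]

theorem B_list (x : Int) :
    lut_uses_inputs_alt x = [decide (PySem.Int.band (PySem.Int.bxor x (x >>> (1:Nat))) 21845 ≠ 0),
      decide (PySem.Int.band (PySem.Int.bxor x (x >>> (2:Nat))) 13107 ≠ 0),
      decide (PySem.Int.band (PySem.Int.bxor x (x >>> (4:Nat))) 3855 ≠ 0),
      decide (PySem.Int.band (PySem.Int.bxor x (x >>> (8:Nat))) 255 ≠ 0)] := by
  unfold lut_uses_inputs_alt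
  rw [pyR4]
  simp only [List.map,
    show (((1:Int) <<< ((Int.toNat 0 : Nat) : Int)).toNat) = 1 from by decide, show (((1:Int) <<< ((Int.toNat 1 : Nat) : Int)).toNat) = 2 from by decide,
    show (((1:Int) <<< ((Int.toNat 2 : Nat) : Int)).toNat) = 4 from by decide, show (((1:Int) <<< ((Int.toNat 3 : Nat) : Int)).toNat) = 8 from by decide,
    show PySem.List.pyGetD lutMasks 0 0 = 21845 from by decide,
    show PySem.List.pyGetD lutMasks 1 0 = 13107 from by decide,
    show PySem.List.pyGetD lutMasks 2 0 = 3855 from by decide,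
    show PySem.List.pyGetD lutMasks 3 0 = 255 from by decide]

-- ===== VERDICT (by name: the statement is the Claim_ definition above) =====
theorem lut_uses_inputs_spec : Claim_equal_lut_uses_inputs := by
  intro x _
  show lut_uses_inputs x = lut_uses_inputs_alt x
  rw [A_list, B_list, key_0, key_1, key_2, key_3]
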